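-- pv_equiv track=rewrite | github.com/David-Lee-1990/zh-NER-TF | eval.py | get_evaDic
-- ===== SOURCE A (Python) =====
-- from collections import defaultdict
--
-- def get_evaDic(seq,nameDic):
--
--     evalDic = defaultdict(list)
--     for n,s in enumerate(seq):
--         if s in nameDic.keys():
--             endName = nameDic[s]
--             endCoor = n
--             while True:
--                 endCoor += 1
--                 if seq[endCoor] != endName:
--                     endCoor -= 1
--                     break
--             evalDic[s].append((n,endCoor))
--
--     return evalDic
-- ===== SOURCE B (Python) =====
-- def get_evaDic(seq, nameDic):
--     # One backward pass: carry the run info (value, run-end index) of the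
--     # current suffix head, emitting hits with an O(1) lookup; then group the
--     # hit list into the result dict in a second forward pass.
--     hits = []
--     run = None  # (value at i+1, end index of its maximal run), or None at the end
--     for i in range(len(seq) - 1, -1, -1):
--         s = seq[i]
--         if s in nameDic:
--             endName = nameDic[s]
--             e = run[1] if run is not None and run[0] == endName else i
--             hits.append((s, (i, e)))
--         run = (s, run[1] if run is not None and run[0] == s else i)
--     hits.reverse()
--     res = {}
--     for s, p in hits:
--         res.setdefault(s, []).append(p)
--     return res
-- ===== Notes on version B (the rewrite author's own statement) =====
-- stated objective: alternative
-- what changed: B replaces A's forward enumerate with a per-hit inner while-scan by a single backward pass that carries the run info of the suffix head and emits a flat hit list (O(1) per position), followed by a separate grouping pass into the dict; Pre_ excludes exactly the inputs where A's scan runs off the end of seq and raises IndexError.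
-- outside the precondition, e.g. on get_evaDic(['a', 'I'], {'a': 'I'}): A raises IndexError, B returns {'a': [(0, 1)]}
import Mathlib
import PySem

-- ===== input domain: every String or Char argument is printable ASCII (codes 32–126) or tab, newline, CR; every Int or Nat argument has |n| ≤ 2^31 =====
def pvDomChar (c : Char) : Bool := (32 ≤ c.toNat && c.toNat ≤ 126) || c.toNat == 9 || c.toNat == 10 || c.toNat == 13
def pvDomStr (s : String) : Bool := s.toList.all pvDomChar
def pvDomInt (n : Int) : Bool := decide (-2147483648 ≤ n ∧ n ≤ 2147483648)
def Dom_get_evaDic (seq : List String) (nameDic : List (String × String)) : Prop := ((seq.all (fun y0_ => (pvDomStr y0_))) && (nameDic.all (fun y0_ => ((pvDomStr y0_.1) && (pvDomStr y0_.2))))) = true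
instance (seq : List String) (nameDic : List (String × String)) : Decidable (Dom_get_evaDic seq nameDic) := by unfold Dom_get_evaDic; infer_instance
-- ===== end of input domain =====

-- B replaces A's per-hit forward while-scan by one backward pass carrying the suffix-head run
-- info and emitting a flat hit list, followed by a separate grouping pass into the dict.

-- ===== PORT A =====
-- the 'while True: endCoor += 1; if seq[endCoor] != endName: endCoor -= 1; break' loop:
-- scans `rest` (= seq[idx:]) forward; none = IndexError (running off the end of seq)
def aScan : List String → Int → String → Option Int
  | [], _, _ => none
  | x :: xs, idx, endName => if x ≠ endName then some (idx - 1) else aScan xs (idx + 1) endName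

-- the 'for n, s in enumerate(seq)' loop; on IndexError (aScan = none, outside Pre_) the step is a no-op
def aLoop (seq : List String) (nd : PySem.Dict String String) :
    Nat → List String → PySem.Dict String (List (Int × Int)) → PySem.Dict String (List (Int × Int))
  | _, [], d => d
  | n, s :: rest, d =>
    let d' :=
      match nd.get? s with
      | none => d
      | some endName =>
        match aScan (seq.drop (n + 1)) ((n : Int) + 1) endName with
        | none => d
        | some e => d.insert s (d.getD s [] ++ [((n : Int), e)])
    aLoop seq nd (n + 1) rest d'

def get_evaDic (seq : List String) (nameDic : List (String × String)) : List (String × List (Int × Int)) :=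
  (aLoop seq (PySem.Dict.mk nameDic) 0 seq PySem.Dict.empty).items

-- ===== PORT B =====
-- the backward 'for i in range(L-1, -1, -1)' pass of Source B, as structural recursion processing
-- the tail first: returns (the hit list, already in left-to-right order = Source B's reversed
-- appends, and the `run` variable for this suffix: (head value, end index of its maximal run))
def bRec (nd : PySem.Dict String String) : List String → Nat → List (String × (Int × Int)) × Option (String × Nat)
  | [], _ => ([], none)
  | x :: xs, i =>
    let r := bRec nd xs (i + 1)
    let hs :=
      match nd.get? x with
      | none => r.1
      | some endName =>
        let e : Int :=
          match r.2 with
          | some (y, e2) => if y = endName then ((e2 : Nat) : Int) else (i : Int)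
          | none => (i : Int)
        (x, ((i : Int), e)) :: r.1
    let myEnd : Nat :=
      match r.2 with
      | some (y, e) => if x = y then e else i
      | none => i
    (hs, some (x, myEnd))

-- the grouping pass 'for s, p in hits: res.setdefault(s, []).append(p)'
def groupHits (hits : List (String × (Int × Int))) (d : PySem.Dict String (List (Int × Int))) :
    PySem.Dict String (List (Int × Int)) :=
  hits.foldl (fun d h => d.insert h.1 (d.getD h.1 [] ++ [h.2])) d

def get_evaDic_alt (seq : List String) (nameDic : List (String × String)) : List (String × List (Int × Int)) :=
  (groupHits (bRec (PySem.Dict.mk nameDic) seq 0).1 PySem.Dict.empty).items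

-- ===== PRECONDITION & SPEC =====
-- Pre_ excludes exactly the inputs on which A raises IndexError: a position holding a nameDic key
-- whose value-run extends to the end of seq (then A's forward scan runs off the list).
def Pre_get_evaDic (seq : List String) (nameDic : List (String × String)) : Prop :=
  ∀ n, n < seq.length →
    (PySem.Dict.mk nameDic).contains (seq.getD n "") = true →
    ∃ j, j < seq.length ∧ n < j ∧
      seq.getD j "" ≠ (PySem.Dict.mk nameDic).getD (seq.getD n "") ""
instance (seq : List String) (nameDic : List (String × String)) : Decidable (Pre_get_evaDic seq nameDic) := by
  unfold Pre_get_evaDic; infer_instance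

def pvWitness_get_evaDic : List String × (List (String × String)) := (["a", "O"], [("a", "I")])

def Spec_get_evaDic (seq : List String) (nameDic : List (String × String)) (out : List (String × List (Int × Int))) : Prop := out = get_evaDic_alt seq nameDic
instance (seq : List String) (nameDic : List (String × String)) (out : List (String × List (Int × Int))) : Decidable (Spec_get_evaDic seq nameDic out) := by unfold Spec_get_evaDic; infer_instance

-- ===== CLAIM (what is proved, stated in full; the proofs are below) =====
def Claim_equal_get_evaDic : Prop := ∀ (seq : List String) (nameDic : List (String × String)), Dom_get_evaDic seq nameDic → Pre_get_evaDic seq nameDic → Spec_get_evaDic seq nameDic (get_evaDic seq nameDic)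

-- ===== LEMMAS AND PROOFS =====

-- length of the leading run of elements equal to e
def cntL (e : String) : List String → Nat
  | [] => 0
  | x :: xs => if x = e then 1 + cntL e xs else 0

lemma aScan_eq (rest : List String) (idx : Int) (e : String)
    (h : ∃ y ∈ rest, y ≠ e) : aScan rest idx e = some (idx + (cntL e rest : Int) - 1) := by
  induction rest generalizing idx with
  | nil => simp at h
  | cons x xs ih =>
    by_cases hx : x = e
    · subst hx
      obtain ⟨y, hy, hye⟩ := h
      have hyxs : y ∈ xs := by
        rcases List.mem_cons.1 hy with h1 | h1
        · exact absurd h1 hye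
        · exact h1
      have h2 : aScan (x :: xs) idx x = aScan xs (idx + 1) x := by simp [aScan]
      have h3 : cntL x (x :: xs) = 1 + cntL x xs := by simp [cntL]
      rw [h2, ih (idx + 1) ⟨y, hyxs, hye⟩, h3]
      congr 1
      push_cast
      ring
    · have h2 : aScan (x :: xs) idx e = some (idx - 1) := by simp [aScan, hx]
      have h3 : cntL e (x :: xs) = 0 := by simp [cntL, hx]
      rw [h2, h3]
      norm_num

-- the run component carried by bRec is (head value, head index + leading-run length of the tail)
lemma bRec_run (nd : PySem.Dict String String) (l : List String) (i : Nat) :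
    (bRec nd l i).2 = match l with
      | [] => none
      | x :: xs => some (x, i + cntL x xs) := by
  induction l generalizing i with
  | nil => rfl
  | cons x xs ih =>
    rcases xs with _ | ⟨y, ys⟩
    · simp [bRec, cntL]
    · have h2 : (bRec nd (y :: ys) (i + 1)).2 = some (y, (i + 1) + cntL y ys) := by
        rw [ih]
      conv_lhs => rw [bRec]
      by_cases hxy : x = y
      · subst hxy
        simp only [h2]
        simp [cntL]
        omega
      · have hyx : ¬ y = x := fun h => hxy h.symm
        simp only [h2]
        simp [cntL, hxy, hyx]

lemma groupHits_cons (h : String × (Int × Int)) (hs : List (String × (Int × Int)))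
    (d : PySem.Dict String (List (Int × Int))) :
    groupHits (h :: hs) d = groupHits hs (d.insert h.1 (d.getD h.1 [] ++ [h.2])) := rfl

lemma getD_of_drop (seq : List String) (m : Nat) (x : String) (xs : List String)
    (h : seq.drop m = x :: xs) : seq.getD m "" = x := by
  have h1 : seq[m]? = (seq.drop m).head? := by rw [List.head?_drop]
  rw [List.getD_eq_getElem?_getD, h1, h]
  rfl

lemma loop_eq (seq : List String) (nd : PySem.Dict String String)
    (hPre : ∀ n, n < seq.length → nd.contains (seq.getD n "") = true →
      ∃ j, j < seq.length ∧ n < j ∧ seq.getD j "" ≠ nd.getD (seq.getD n "") "") :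
    ∀ (rest : List String) (n : Nat) (d : PySem.Dict String (List (Int × Int))),
      seq.drop n = rest →
      aLoop seq nd n rest d = groupHits (bRec nd rest n).1 d := by
  intro rest
  induction rest with
  | nil => intro n d _; rfl
  | cons s rest ih =>
    intro n d hdrop
    have hlen : seq.length - n = rest.length + 1 := by
      have h := congrArg List.length hdrop
      simp at h
      omega
    have hn : n < seq.length := by omega
    have hdrop1 : seq.drop (n + 1) = rest := by
      rw [← List.tail_drop, hdrop]
      rfl
    have hs : seq.getD n "" = s := getD_of_drop seq n s rest hdrop
    rcases hget : nd.get? s with _ | endName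
    · have hA : aLoop seq nd n (s :: rest) d = aLoop seq nd (n + 1) rest d := by
        simp [aLoop, hget]
      have hB : (bRec nd (s :: rest) n).1 = (bRec nd rest (n + 1)).1 := by
        conv_lhs => rw [bRec]
        simp [hget]
      rw [hA, hB, ih (n + 1) d hdrop1]
    · have hcont : nd.contains (seq.getD n "") = true := by
        rw [hs, PySem.Dict.contains_eq_isSome_get?, hget]
        rfl
      have hgetD : nd.getD (seq.getD n "") "" = endName := by
        rw [hs, PySem.Dict.getD_eq_get?_getD, hget]
        rfl
      obtain ⟨j, hj, hnj, hne⟩ := hPre n hn hcont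
      rw [hgetD] at hne
      rcases hrest : rest with _ | ⟨x, xs⟩
      · subst hrest
        exfalso
        simp at hlen
        omega
      · subst hrest
        -- B's end value for this hit
        have hrun : (bRec nd (x :: xs) (n + 1)).2 = some (x, (n + 1) + cntL x xs) := by
          rw [bRec_run]
        have hB : (bRec nd (s :: x :: xs) n).1 =
            (s, ((n : Int), if x = endName then (((n + 1) + cntL x xs : Nat) : Int) else (n : Int)))
              :: (bRec nd (x :: xs) (n + 1)).1 := by
          conv_lhs => rw [bRec]
          simp only [hget, hrun]
        -- A's scanned end value agrees
        have hk : j - (n + 1) < (x :: xs).length := by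
          have h := congrArg List.length hdrop1
          simp at h
          simp
          omega
        have hyelem : (x :: xs).getD (j - (n + 1)) "" = seq.getD j "" := by
          rw [List.getD_eq_getElem?_getD, List.getD_eq_getElem?_getD, ← hdrop1,
            List.getElem?_drop]
          congr 2
          omega
        have hymem : ∃ y ∈ x :: xs, y ≠ endName := by
          refine ⟨(x :: xs).getD (j - (n + 1)) "", ?_, by rw [hyelem]; exact hne⟩
          rw [List.getD_eq_getElem?_getD, List.getElem?_eq_getElem hk]
          exact List.getElem_mem hk
        have hscan : aScan (seq.drop (n + 1)) ((n : Int) + 1) endName =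
            some (if x = endName then (((n + 1) + cntL x xs : Nat) : Int) else (n : Int)) := by
          rw [hdrop1]
          by_cases hxe : x = endName
          · rw [aScan_eq (x :: xs) ((n : Int) + 1) endName hymem]
            have hcnt : cntL endName (x :: xs) = 1 + cntL x xs := by
              subst hxe
              simp [cntL]
            rw [hcnt, if_pos hxe]
            congr 1
            push_cast
            ring
          · rw [if_neg hxe]
            simp [aScan, hxe]
        have hA : aLoop seq nd n (s :: x :: xs) d =
            aLoop seq nd (n + 1) (x :: xs)
              (d.insert s (d.getD s [] ++ [((n : Int),
                if x = endName then (((n + 1) + cntL x xs : Nat) : Int) else (n : Int))])) := by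
          simp only [aLoop, hget, hscan]
        rw [hA, hB, groupHits_cons,
          ih (n + 1) _ hdrop1]

-- ===== VERDICT (by name: the statement is the Claim_ definition above) =====
theorem get_evaDic_spec : Claim_equal_get_evaDic := by
  intro seq nameDic _ hPre
  unfold Spec_get_evaDic get_evaDic get_evaDic_alt
  rw [loop_eq seq (PySem.Dict.mk nameDic) hPre seq 0 PySem.Dict.empty (by simp)]
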